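-- pv_equiv track=rewrite | github.com/rhklite/MacOS-Audio-input-source.-Switch-script- | input_source_menubar.py | find_matching_input
-- ===== SOURCE A (Python) =====
-- from typing import Optional
--
-- def find_matching_input(output_device: str, connected_inputs: list[str]) -> Optional[str]:
--     """Find a connected input device whose name matches the current output."""
--     for inp in connected_inputs:
--         if inp == output_device:
--             return inp
--     for inp in connected_inputs:
--         if output_device in inp or inp in output_device:
--             return inp
--     return None
-- ===== SOURCE B (Python) =====
-- def find_matching_input(output_device, connected_inputs):
--     """Find a connected input device whose name matches the current output."""
--     first_substring = None
--     for inp in connected_inputs: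
--         if inp == output_device:
--             return inp
--         if first_substring is None and (output_device in inp or inp in output_device):
--             first_substring = inp
--     return first_substring
-- ===== Notes on version B (the rewrite author's own statement) =====
-- stated objective: simpler
-- what changed: Replaces A's two sequential scans (exact match, then substring match) by a single pass that returns immediately on an exact match and remembers the first substring match as a fallback.
import Mathlib
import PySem

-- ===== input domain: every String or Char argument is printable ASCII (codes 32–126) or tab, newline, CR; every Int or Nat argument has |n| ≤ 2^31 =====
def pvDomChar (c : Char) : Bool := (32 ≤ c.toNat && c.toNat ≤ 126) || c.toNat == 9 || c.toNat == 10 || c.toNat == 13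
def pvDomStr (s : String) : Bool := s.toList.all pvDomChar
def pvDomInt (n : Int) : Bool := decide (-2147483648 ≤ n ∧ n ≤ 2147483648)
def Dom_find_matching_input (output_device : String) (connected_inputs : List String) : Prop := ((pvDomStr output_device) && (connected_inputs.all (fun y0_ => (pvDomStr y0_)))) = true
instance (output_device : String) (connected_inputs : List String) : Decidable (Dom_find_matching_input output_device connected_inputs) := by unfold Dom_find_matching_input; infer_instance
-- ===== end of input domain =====

-- B: one pass that returns on exact match and remembers the first substring match, instead of A's two scans.
-- ===== PORT A =====
def fmiExact (output_device : String) : List String → Option String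
  | [] => none
  | inp :: rest => if inp == output_device then some inp else fmiExact output_device rest

def fmiSub (output_device : String) : List String → Option String
  | [] => none
  | inp :: rest =>
      if PySem.Str.isIn output_device inp || PySem.Str.isIn inp output_device then some inp
      else fmiSub output_device rest

def find_matching_input (output_device : String) (connected_inputs : List String) : Option String :=
  match fmiExact output_device connected_inputs with
  | some inp => some inp
  | none => fmiSub output_device connected_inputs

-- ===== PORT B =====
def fmiLoop (output_device : String) : List String → Option String → Option String
  | [], first_substring => first_substring
  | inp :: rest, first_substring =>
      if inp == output_device then some inp
      else fmiLoop output_device rest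
        (if first_substring.isNone &&
            (PySem.Str.isIn output_device inp || PySem.Str.isIn inp output_device)
         then some inp else first_substring)

def find_matching_input_alt (output_device : String) (connected_inputs : List String) : Option String :=
  fmiLoop output_device connected_inputs none

-- ===== PRECONDITION & SPEC =====
def Spec_find_matching_input (output_device : String) (connected_inputs : List String) (out : Option String) : Prop := out = find_matching_input_alt output_device connected_inputs
instance (output_device : String) (connected_inputs : List String) (out : Option String) : Decidable (Spec_find_matching_input output_device connected_inputs out) := by unfold Spec_find_matching_input; infer_instance

-- ===== CLAIM (what is proved, stated in full; the proofs are below) =====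
def Claim_equal_find_matching_input : Prop := ∀ (output_device : String) (connected_inputs : List String), Dom_find_matching_input output_device connected_inputs → Spec_find_matching_input output_device connected_inputs (find_matching_input output_device connected_inputs)

-- ===== LEMMAS AND PROOFS =====

-- ===== VERDICT (by name: the statement is the Claim_ definition above) =====
lemma fmiLoop_eq (output_device : String) (l : List String) (acc : Option String) :
    fmiLoop output_device l acc =
      match fmiExact output_device l with
      | some x => some x
      | none => match acc with
        | some a => some a
        | none => fmiSub output_device l := by
  induction l generalizing acc with
  | nil => cases acc <;> simp [fmiLoop, fmiExact, fmiSub]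
  | cons x xs ih =>
      simp only [fmiLoop, fmiExact, fmiSub]
      by_cases hx : (x == output_device) = true
      · simp [hx]
      · simp only [hx, Bool.false_eq_true, if_false, ih]
        cases acc <;> split_ifs <;> simp_all

theorem find_matching_input_spec : Claim_equal_find_matching_input := by
  intro od l _
  unfold Spec_find_matching_input find_matching_input find_matching_input_alt
  rw [fmiLoop_eq]
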